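-- pv_equiv track=rewrite | github.com/genggng/leetcode | 1016.子串能表示从-1-到-n-数字的二进制串.py | queryString
-- ===== SOURCE A (Python) =====
-- def queryString(s: str, n: int) -> bool:
--     # 反向，统计s所有子串的二进制值在[1,n]的个数，如果等于n则通过
--     seen = set()
--     s = list(map(int,s))
--     for i,x in enumerate(s):
--         if x == 0: continue  #起始位置i如果为0，直接跳过，前导0不影响值。
--         j = i+1
--         while x<=n:
--             seen.add(x)
--             if j == len(s):break
--             x = (x<<1) | s[j]  # 从子串[i,j]的二进制计算[i,j+1]的二进制
--             j += 1
--     return len(seen) == n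
-- ===== SOURCE B (Python) =====
-- def queryString(s: str, n: int) -> bool:
--     # Endpoint-indexed dynamic programming: for each position, maintain the set
--     # of values (<= n) of all substrings ending there; collect everything seen
--     # and compare the count of nonzero values with n.
--     bits = [int(c) for c in s]
--     seen = set()
--     cur = set()
--     for d in bits:
--         cur = {v * 2 + d for v in cur} | {d}
--         cur = {v for v in cur if v <= n}
--         seen |= cur
--     return len(seen - {0}) == n
-- ===== Notes on version B (the rewrite author's own statement) =====
-- stated objective: alternative
-- what changed: A scans per start index, extending a rolling bitwise value with early termination into one set; B is an endpoint-indexed dynamic program that maintains the set of values of all substrings ending at each position via set comprehensions and finally counts the nonzero values collected.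
-- outside the precondition, e.g. on queryString('112', 4): A returns False, B returns True; on queryString('21', 2): A returns True, B returns True
import Mathlib
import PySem

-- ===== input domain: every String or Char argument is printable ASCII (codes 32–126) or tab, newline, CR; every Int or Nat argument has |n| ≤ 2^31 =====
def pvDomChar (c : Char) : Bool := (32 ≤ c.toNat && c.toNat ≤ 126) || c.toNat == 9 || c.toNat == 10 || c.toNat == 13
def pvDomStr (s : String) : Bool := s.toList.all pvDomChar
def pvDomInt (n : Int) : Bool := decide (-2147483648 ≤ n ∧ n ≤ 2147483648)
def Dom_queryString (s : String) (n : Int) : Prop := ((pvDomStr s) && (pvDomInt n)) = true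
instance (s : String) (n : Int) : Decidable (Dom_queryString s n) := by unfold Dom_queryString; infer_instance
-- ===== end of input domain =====

-- B replaces A's start-indexed bitwise substring-value scan by an
-- endpoint-indexed dynamic program over sets of substring values (an
-- alternative decomposition of the same counting task).


-- ===== PORT A =====
-- int(c) for a single character; Pre_ restricts s to '0'/'1' so the ValueError
-- case (ofChars? = none) never occurs inside Pre_ and the default is unreachable.
def qsDigit (c : Char) : Int := (PySem.Int.ofChars? [c]).getD 0

-- the inner 'while x <= n' loop of A: j walks 'rest', x is the running value
def qsInner (n x : Int) (rest : List Int) (seen : PySem.Set Int) : PySem.Set Int :=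
  if x ≤ n then
    match rest with
    | [] => PySem.Set.add seen x
    | d :: rest' => qsInner n (PySem.Int.bor (x <<< (1 : Nat)) d) rest' (PySem.Set.add seen x)
  else seen

-- the outer 'for i,x in enumerate(s)' loop; the index i is only used as j = i+1,
-- i.e. to hand the tail after x to the inner loop
def qsOuter (n : Int) : List Int → PySem.Set Int → PySem.Set Int
  | [], seen => seen
  | x :: rest, seen => qsOuter n rest (if x == 0 then seen else qsInner n x rest seen)

def queryString (s : String) (n : Int) : Bool :=
  let ds := s.toList.map qsDigit
  ((PySem.Set.len (qsOuter n ds PySem.Set.empty)) == n)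

-- ===== PORT B =====
-- the 'for d in bits' loop of B: state (seen, cur)
def qsAltLoop (n : Int) : List Int → PySem.Set Int × PySem.Set Int → PySem.Set Int × PySem.Set Int
  | [], st => st
  | d :: r, (seen, cur) =>
    -- cur = {v * 2 + d for v in cur} | {d}
    let cur1 := PySem.Set.union (PySem.Set.ofList (cur.map (fun v => v * 2 + d))) (PySem.Set.ofList [d])
    -- cur = {v for v in cur if v <= n}
    let cur2 := PySem.Set.ofList (cur1.filter (fun v => decide (v ≤ n)))
    -- seen |= cur
    qsAltLoop n r (PySem.Set.union seen cur2, cur2)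

def queryString_alt (s : String) (n : Int) : Bool :=
  let bits := s.toList.map qsDigit
  let st := qsAltLoop n bits (PySem.Set.empty, PySem.Set.empty)
  -- len(seen - {0}) == n
  (PySem.Set.len (PySem.Set.diff st.1 (PySem.Set.ofList [0])) == n)

-- ===== PRECONDITION & SPEC =====
-- Pre_ restricts to the task's natural domain: s a binary string. Outside it A
-- raises ValueError (a non-digit character in s) or returns an artefact of
-- reading the digits 2..9 as binary digit values through its bitwise-or update
-- (B reads them arithmetically, so the two may differ there).
def Pre_queryString (s : String) (n : Int) : Prop :=
  (s.toList.all (fun c => c == '0' || c == '1')) = true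
instance (s : String) (n : Int) : Decidable (Pre_queryString s n) := by
  unfold Pre_queryString; infer_instance

def pvWitness_queryString : String × Int := ("110", 3)

def Spec_queryString (s : String) (n : Int) (out : Bool) : Prop := out = queryString_alt s n
instance (s : String) (n : Int) (out : Bool) : Decidable (Spec_queryString s n out) := by
  unfold Spec_queryString; infer_instance

-- ===== CLAIM (what is proved, stated in full; the proofs are below) =====
def Claim_equal_queryString : Prop := ∀ (s : String) (n : Int), Dom_queryString s n → Pre_queryString s n → Spec_queryString s n (queryString s n)

-- ===== LEMMAS AND PROOFS =====

-- values of all nonempty prefixes of x :: rest, read as binary digits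
def pvals (x : Int) : List Int → List Int
  | [] => [x]
  | d :: r => x :: pvals (2 * x + d) r

-- values of all strict extensions of a value w by successive digits of r
def evals : Int → List Int → List Int
  | _, [] => []
  | w, d :: r => (2 * w + d) :: evals (2 * w + d) r

-- values of all substrings of ds that start with a nonzero digit
def allVals : List Int → List Int
  | [] => []
  | x :: r => (if x = 0 then [] else pvals x r) ++ allVals r

-- values of ALL nonempty substrings of ds (leading zeros allowed)
def allValsAny : List Int → List Int
  | [] => []
  | d :: r => pvals d r ++ allValsAny r

def qsIsBin (l : List Int) : Prop := ∀ d ∈ l, d = 0 ∨ d = 1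

lemma qsDigit_zero : qsDigit '0' = 0 := by decide
lemma qsDigit_one : qsDigit '1' = 1 := by decide

lemma natlor_two_mul_add_one (m : Nat) : (2 * m) ||| 1 = 2 * m + 1 := by
  have h1 : (2 * m) = Nat.bit false m := by simp [Nat.bit_val]
  have h2 : (1 : Nat) = Nat.bit true 0 := by simp [Nat.bit_val]
  rw [h1, h2, Nat.lor_bit]
  simp [Nat.bit_val]

lemma bor_shift (x d : Int) (hx : 0 ≤ x) (hd : d = 0 ∨ d = 1) :
    PySem.Int.bor (x <<< (1 : Nat)) d = 2 * x + d := by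
  have hs : x <<< (1 : Nat) = 2 * x := by simp [Int.shiftLeft_eq]; ring
  rw [hs]
  rcases hd with rfl | rfl
  · simp [PySem.Int.bor_zero]
  · rw [PySem.Int.bor_of_nonneg (by omega) (by omega)]
    have h2 : (2 * x).toNat = 2 * x.toNat := by omega
    rw [h2, show ((1 : Int)).toNat = 1 from rfl, natlor_two_mul_add_one]
    omega

lemma pvals_eq_cons (r : List Int) : ∀ x : Int, pvals x r = x :: evals x r := by
  induction r with
  | nil => intro x; rfl
  | cons d r ih => intro x; rw [pvals, evals, ih (2 * x + d)]

lemma mem_pvals_lb (r : List Int) : ∀ x : Int, 0 ≤ x → qsIsBin r →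
    ∀ v ∈ pvals x r, x ≤ v := by
  induction r with
  | nil => intro x hx _ v hv; simp [pvals] at hv; omega
  | cons d r ih =>
    intro x hx hr v hv
    simp only [pvals, List.mem_cons] at hv
    rcases hv with rfl | hv
    · omega
    · have hd : d = 0 ∨ d = 1 := hr d (by simp)
      have := ih (2 * x + d) (by omega) (fun e he => hr e (by simp [he])) v hv
      omega

lemma mem_evals_lb (r : List Int) (w : Int) (hw : 0 ≤ w) (hr : qsIsBin r) :
    ∀ v ∈ evals w r, w ≤ v := by
  intro v hv
  have h := mem_pvals_lb r w hw hr v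
  rw [pvals_eq_cons] at h
  exact h (List.mem_cons_of_mem w hv)

lemma qsInner_mem (n : Int) (r : List Int) : ∀ x : Int, ∀ seen : PySem.Set Int,
    1 ≤ x → qsIsBin r → ∀ v : Int,
    (v ∈ qsInner n x r seen ↔ v ∈ seen ∨ (v ≤ n ∧ v ∈ pvals x r)) := by
  induction r with
  | nil =>
    intro x seen hx _ v
    by_cases hxn : x ≤ n
    · simp only [qsInner, if_pos hxn, PySem.Set.mem_add, pvals, List.mem_singleton]
      constructor
      · rintro (h | rfl)
        · exact Or.inl h
        · exact Or.inr ⟨hxn, rfl⟩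
      · rintro (h | ⟨_, rfl⟩)
        · exact Or.inl h
        · exact Or.inr rfl
    · simp only [qsInner, if_neg hxn, pvals, List.mem_singleton]
      constructor
      · exact Or.inl
      · rintro (h | ⟨hvn, rfl⟩)
        · exact h
        · omega
  | cons d r ih =>
    intro x seen hx hr v
    have hd : d = 0 ∨ d = 1 := hr d (by simp)
    have hrt : qsIsBin r := fun e he => hr e (by simp [he])
    by_cases hxn : x ≤ n
    · rw [qsInner, if_pos hxn, bor_shift x d (by omega) hd,
        ih (2 * x + d) (PySem.Set.add seen x) (by omega) hrt v]
      simp only [PySem.Set.mem_add, pvals, List.mem_cons]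
      constructor
      · rintro ((h | rfl) | ⟨hvn, hv⟩)
        · exact Or.inl h
        · exact Or.inr ⟨hxn, Or.inl rfl⟩
        · exact Or.inr ⟨hvn, Or.inr hv⟩
      · rintro (h | ⟨hvn, rfl | hv⟩)
        · exact Or.inl (Or.inl h)
        · exact Or.inl (Or.inr rfl)
        · exact Or.inr ⟨hvn, hv⟩
    · rw [qsInner, if_neg hxn]
      constructor
      · exact Or.inl
      · rintro (h | ⟨hvn, hv⟩)
        · exact h
        · have := mem_pvals_lb (d :: r) x (by omega) hr v hv
          omega

lemma qsOuter_mem (n : Int) (ds : List Int) : ∀ seen : PySem.Set Int,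
    qsIsBin ds → ∀ v : Int,
    (v ∈ qsOuter n ds seen ↔ v ∈ seen ∨ (v ≤ n ∧ v ∈ allVals ds)) := by
  induction ds with
  | nil => intro seen _ v; simp [qsOuter, allVals]
  | cons x r ih =>
    intro seen hds v
    have hx : x = 0 ∨ x = 1 := hds x (by simp)
    have hrt : qsIsBin r := fun e he => hds e (by simp [he])
    rcases hx with rfl | rfl
    · rw [qsOuter, if_pos (by decide), ih seen hrt v]
      simp [allVals]
    · rw [qsOuter, if_neg (by decide), ih _ hrt v,
        qsInner_mem n r 1 seen (le_refl 1) hrt v]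
      simp only [allVals, if_neg (by norm_num : (1 : Int) ≠ 0), List.mem_append]
      tauto

lemma qsInner_nodup (n : Int) (r : List Int) : ∀ x : Int, ∀ seen : PySem.Set Int,
    seen.Nodup → (qsInner n x r seen).Nodup := by
  induction r with
  | nil =>
    intro x seen h
    rw [qsInner]
    split_ifs with hxn
    · exact PySem.Set.nodup_add seen x h
    · exact h
  | cons d r ih =>
    intro x seen h
    rw [qsInner]
    split_ifs with hxn
    · exact ih _ _ (PySem.Set.nodup_add seen x h)
    · exact h

lemma qsOuter_nodup (n : Int) (ds : List Int) : ∀ seen : PySem.Set Int,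
    seen.Nodup → (qsOuter n ds seen).Nodup := by
  induction ds with
  | nil => intro seen h; exact h
  | cons x r ih =>
    intro seen h
    rw [qsOuter]
    split_ifs with hx
    · exact ih seen h
    · exact ih _ (qsInner_nodup n r x seen h)

lemma mem_allVals_lb (ds : List Int) (hds : qsIsBin ds) :
    ∀ v ∈ allVals ds, 1 ≤ v := by
  induction ds with
  | nil => intro v hv; simp [allVals] at hv
  | cons x r ih =>
    intro v hv
    have hrt : qsIsBin r := fun e he => hds e (by simp [he])
    rw [allVals, List.mem_append] at hv
    rcases hv with hv | hv
    · split_ifs at hv with hx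
      · simp at hv
      · have hx1 : x = 1 := by rcases hds x (by simp) with h | h <;> omega
        subst hx1
        exact mem_pvals_lb r 1 (by omega) hrt v hv
    · exact ih hrt v hv

-- nonzero substring values are exactly the values of leading-1 substrings
lemma mem_allValsAny_iff (ds : List Int) (hds : qsIsBin ds) :
    ∀ v : Int, (v ∈ allValsAny ds ∧ v ≠ 0 ↔ v ∈ allVals ds) := by
  induction ds with
  | nil => intro v; simp [allVals, allValsAny]
  | cons x r ih =>
    intro v
    have hrt : qsIsBin r := fun e he => hds e (by simp [he])
    have hx : x = 0 ∨ x = 1 := hds x (by simp)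
    constructor
    · rintro ⟨hv, hv0⟩
      rw [allValsAny, List.mem_append] at hv
      rw [allVals, List.mem_append]
      rcases hv with hv | hv
      · rcases hx with rfl | rfl
        · -- leading zero: strip it
          cases r with
          | nil => simp [pvals] at hv; omega
          | cons d r' =>
            rw [pvals, show (2 * (0 : Int) + d) = d by ring, List.mem_cons] at hv
            rcases hv with rfl | hv
            · omega
            · have : v ∈ allValsAny (d :: r') := by
                rw [allValsAny, List.mem_append]; exact Or.inl hv
              exact Or.inr ((ih hrt v).mp ⟨this, hv0⟩)
        · exact Or.inl (by rw [if_neg (by norm_num : (1 : Int) ≠ 0)]; exact hv)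
      · exact Or.inr ((ih hrt v).mp ⟨hv, hv0⟩)
    · intro hv
      refine ⟨?_, by have := mem_allVals_lb (x :: r) hds v hv; omega⟩
      rw [allVals, List.mem_append] at hv
      rw [allValsAny, List.mem_append]
      rcases hv with hv | hv
      · split_ifs at hv with h0
        · simp at hv
        · exact Or.inl hv
      · exact Or.inr ((ih hrt v).mpr hv).1

-- membership in the seen-component of B's loop
lemma qsAltLoop_mem (n : Int) (r : List Int) : ∀ seen cur : PySem.Set Int,
    qsIsBin r → (∀ w ∈ cur, 0 ≤ w ∧ w ≤ n) → ∀ v : Int,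
    (v ∈ (qsAltLoop n r (seen, cur)).1 ↔
      v ∈ seen ∨ (v ≤ n ∧ (v ∈ allValsAny r ∨ ∃ w ∈ cur, v ∈ evals w r))) := by
  induction r with
  | nil =>
    intro seen cur _ _ v
    simp [qsAltLoop, allValsAny, evals]
  | cons d r ih =>
    intro seen cur hr hcur v
    have hd : d = 0 ∨ d = 1 := hr d (by simp)
    have hrt : qsIsBin r := fun e he => hr e (by simp [he])
    rw [qsAltLoop]
    set cur1 := PySem.Set.union (PySem.Set.ofList (cur.map (fun v => v * 2 + d))) (PySem.Set.ofList [d]) with hc1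
    set cur2 := PySem.Set.ofList (cur1.filter (fun v => decide (v ≤ n))) with hc2
    have hcur2 : ∀ u : Int, u ∈ cur2 ↔ (u ≤ n ∧ ((∃ w ∈ cur, u = w * 2 + d) ∨ u = d)) := by
      intro u
      rw [hc2, PySem.Set.mem_ofList, List.mem_filter, hc1, PySem.Set.mem_union,
        PySem.Set.mem_ofList, PySem.Set.mem_ofList, List.mem_map]
      simp only [decide_eq_true_eq, List.mem_singleton]
      constructor
      · rintro ⟨h1, h2⟩
        refine ⟨h2, ?_⟩
        rcases h1 with ⟨w, hw, rfl⟩ | rfl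
        · exact Or.inl ⟨w, hw, rfl⟩
        · exact Or.inr rfl
      · rintro ⟨h2, (⟨w, hw, rfl⟩ | rfl)⟩
        · exact ⟨Or.inl ⟨w, hw, rfl⟩, h2⟩
        · exact ⟨Or.inr rfl, h2⟩
    have hcur2b : ∀ w ∈ cur2, 0 ≤ w ∧ w ≤ n := by
      intro u hu
      rw [hcur2 u] at hu
      obtain ⟨hun, hform⟩ := hu
      rcases hform with ⟨w, hw, rfl⟩ | rfl
      · have := (hcur w hw).1
        constructor <;> omega
      · constructor <;> omega
    rw [ih (PySem.Set.union seen cur2) cur2 hrt hcur2b v, PySem.Set.mem_union]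
    simp only [allValsAny, List.mem_append, pvals_eq_cons, evals, List.mem_cons]
    constructor
    · rintro ((hs | hcv) | ⟨hvn, hv⟩)
      · exact Or.inl hs
      · rw [hcur2 v] at hcv
        obtain ⟨hvn, hform⟩ := hcv
        rcases hform with ⟨w, hw, rfl⟩ | rfl
        · exact Or.inr ⟨hvn, Or.inr ⟨w, hw, Or.inl (by ring)⟩⟩
        · exact Or.inr ⟨hvn, Or.inl (Or.inl (Or.inl rfl))⟩
      · rcases hv with hv | ⟨w', hw', hv⟩
        · exact Or.inr ⟨hvn, Or.inl (Or.inr hv)⟩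
        · rw [hcur2 w'] at hw'
          obtain ⟨hw'n, hform⟩ := hw'
          rcases hform with ⟨w, hw, rfl⟩ | rfl
          · exact Or.inr ⟨hvn, Or.inr ⟨w, hw, Or.inr (by rw [show 2 * w + d = w * 2 + d by ring]; exact hv)⟩⟩
          · exact Or.inr ⟨hvn, Or.inl (Or.inl (Or.inr hv))⟩
    · rintro (hs | ⟨hvn, hv⟩)
      · exact Or.inl (Or.inl hs)
      · rcases hv with (hv | hv) | hv2
        · -- v ∈ d :: evals d r  (a fresh start at d)
          rcases hv with rfl | hv
          · exact Or.inl (Or.inr ((hcur2 v).mpr ⟨hvn, Or.inr rfl⟩))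
          · by_cases hdn : d ≤ n
            · refine Or.inr ⟨hvn, Or.inr ⟨d, (hcur2 d).mpr ⟨hdn, Or.inr rfl⟩, hv⟩⟩
            · have := mem_evals_lb r d (by omega) hrt v hv
              omega
        · exact Or.inr ⟨hvn, Or.inl hv⟩
        · -- v extends some w ∈ cur through d
          obtain ⟨w, hw, hv⟩ := hv2
          have hwb := hcur w hw
          rcases hv with rfl | hv
          · exact Or.inl (Or.inr ((hcur2 (2 * w + d)).mpr ⟨hvn, Or.inl ⟨w, hw, by ring⟩⟩))
          · by_cases hwd : 2 * w + d ≤ n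
            · refine Or.inr ⟨hvn, Or.inr ⟨2 * w + d, (hcur2 _).mpr ⟨hwd, Or.inl ⟨w, hw, by ring⟩⟩, hv⟩⟩
            · have := mem_evals_lb r (2 * w + d) (by omega) hrt v hv
              omega

lemma qsAltLoop_nodup (n : Int) (r : List Int) : ∀ seen cur : PySem.Set Int,
    seen.Nodup → ((qsAltLoop n r (seen, cur)).1).Nodup := by
  induction r with
  | nil => intro seen cur h; exact h
  | cons d r ih =>
    intro seen cur h
    rw [qsAltLoop]
    exact ih _ _ (PySem.Set.nodup_union _ _ h)

-- ===== VERDICT (by name: the statement is the Claim_ definition above) =====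
theorem queryString_spec : Claim_equal_queryString := by
  intro s n _ hbin0
  have hbin : ∀ c ∈ s.toList, c = '0' ∨ c = '1' := by
    intro c hc
    have h := List.all_eq_true.mp hbin0 c hc
    simpa using h
  unfold Spec_queryString
  set ds := s.toList.map qsDigit with hds0
  have hds : qsIsBin ds := by
    intro d hd
    obtain ⟨c, hc, rfl⟩ := List.mem_map.mp hd
    rcases hbin c hc with rfl | rfl
    · exact Or.inl qsDigit_zero
    · exact Or.inr qsDigit_one
  set lA := qsOuter n ds PySem.Set.empty with hlA
  set lB := PySem.Set.diff (qsAltLoop n ds (PySem.Set.empty, PySem.Set.empty)).1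
      (PySem.Set.ofList [0]) with hlB
  have hmemA : ∀ v : Int, v ∈ lA ↔ (v ≤ n ∧ v ∈ allVals ds) := by
    intro v
    rw [hlA, qsOuter_mem n ds PySem.Set.empty hds v]
    simp [PySem.Set.empty]
  have hmemB : ∀ v : Int, v ∈ lB ↔ (v ≤ n ∧ v ∈ allVals ds) := by
    intro v
    rw [hlB, PySem.Set.mem_diff,
      qsAltLoop_mem n ds PySem.Set.empty PySem.Set.empty hds (by simp [PySem.Set.empty]) v]
    simp only [PySem.Set.empty, List.not_mem_nil, false_or, false_and, exists_false,
      or_false, PySem.Set.mem_ofList, List.mem_singleton]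
    constructor
    · rintro ⟨⟨hvn, hv⟩, hv0⟩
      exact ⟨hvn, (mem_allValsAny_iff ds hds v).mp ⟨hv, hv0⟩⟩
    · rintro ⟨hvn, hv⟩
      have h2 := (mem_allValsAny_iff ds hds v).mpr hv
      exact ⟨⟨hvn, h2.1⟩, h2.2⟩
  have hndA : lA.Nodup := qsOuter_nodup n ds _ List.nodup_nil
  have hndB : lB.Nodup :=
    PySem.Set.nodup_diff _ _ (qsAltLoop_nodup n ds _ _ List.nodup_nil)
  have hperm : lA.Perm lB := by
    rw [List.perm_ext_iff_of_nodup hndA hndB]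
    intro v
    rw [hmemA v, hmemB v]
  have hlen : lA.length = lB.length := hperm.length_eq
  show ((PySem.Set.len lA == n)) = ((PySem.Set.len lB == n))
  rw [PySem.Set.len, PySem.Set.len, hlen]
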